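-- pv_equiv track=rewrite | github.com/Salnikov-Nikita/informatics_school46 | type_5/main.py | check
-- ===== SOURCE A (Python) =====
-- def check(a):
--     a = sorted(a)
--     for i in range(len(a) - 2):
--         for j in range(i + 1, len(a) - 1):
--             for k in range(j + 1, len(a)):
--                 if a[i] * a[k] == a[j] ** 2 and a[i] != a[j]:
--                     return 1
--     return 0
-- ===== SOURCE B (Python) =====
-- def check(a):
--     vals = set(a)
--     if a.count(0) >= 2 and any(x < 0 for x in vals):
--         return 1
--     for x in vals:
--         if x == 0:
--             continue
--         for y in vals:
--             if x < y and (y * y) % x == 0: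
--                 z = (y * y) // x
--                 if z > y and z in vals:
--                     return 1
--     return 0
-- ===== Notes on version B (the rewrite author's own statement) =====
-- stated objective: faster
-- what changed: A sorts and scans all O(n^3) index triples; B builds the set of distinct values once and scans value pairs (x,y), testing membership of the exact quotient y*y//x in the set, with a separate check for 'two zeros plus a negative' (the only triple whose outer values coincide).
import Mathlib
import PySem

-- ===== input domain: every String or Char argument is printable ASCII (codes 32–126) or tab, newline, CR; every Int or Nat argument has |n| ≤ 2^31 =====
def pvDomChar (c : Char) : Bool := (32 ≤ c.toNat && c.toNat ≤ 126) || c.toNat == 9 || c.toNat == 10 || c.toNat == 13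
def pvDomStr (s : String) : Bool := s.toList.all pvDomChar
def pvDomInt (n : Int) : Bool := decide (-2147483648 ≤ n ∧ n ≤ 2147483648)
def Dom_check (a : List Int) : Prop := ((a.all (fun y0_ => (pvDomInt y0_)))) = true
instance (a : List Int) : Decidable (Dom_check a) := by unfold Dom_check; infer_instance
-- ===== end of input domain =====

-- B replaces A's cubic scan over sorted index triples by a quadratic scan over the
-- DISTINCT values (plus a separate duplicate-zero check); objective: faster.

-- ===== PORT A =====
-- sorted a; triple loop i<j<k with early 'return 1'; the loop is ported as `any`.
def check (a : List Int) : Int :=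
  let s := PySem.List.sorted a (fun x => x) false
  if (PySem.List.pyRange 0 ((s.length : Int) - 2) 1).any (fun i =>
      (PySem.List.pyRange (i + 1) ((s.length : Int) - 1) 1).any (fun j =>
        (PySem.List.pyRange (j + 1) (s.length : Int) 1).any (fun k =>
          decide (PySem.List.pyGetD s i 0 * PySem.List.pyGetD s k 0 = (PySem.List.pyGetD s j 0) ^ 2
                  ∧ PySem.List.pyGetD s i 0 ≠ PySem.List.pyGetD s j 0))))
  then 1 else 0

-- ===== PORT B =====
-- set of distinct values; duplicate-zero-with-a-negative check, then a pair scan over the set.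
def check_alt (a : List Int) : Int :=
  let vals : PySem.Set Int := PySem.Set.ofList a
  if decide (2 ≤ PySem.List.count a 0) && vals.any (fun x => decide (x < 0)) then 1
  else if vals.any (fun x => decide (x ≠ 0) &&
        vals.any (fun y => decide (x < y) && decide (PySem.Int.mod (y * y) x = 0) &&
          (decide (y < PySem.Int.floordiv (y * y) x) &&
            PySem.Set.contains vals (PySem.Int.floordiv (y * y) x))))
  then 1 else 0

-- ===== PRECONDITION & SPEC =====
def Spec_check (a : List Int) (out : Int) : Prop := out = check_alt a
instance (a : List Int) (out : Int) : Decidable (Spec_check a out) := by unfold Spec_check; infer_instance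

-- ===== CLAIM (what is proved, stated in full; the proofs are below) =====
def Claim_equal_check : Prop := ∀ (a : List Int), Dom_check a → Spec_check a (check a)

-- ===== LEMMAS AND PROOFS =====

-- A's condition on the sorted list, as a Prop over natural indices.
def TriP (s : List Int) : Prop :=
  ∃ i j k : ℕ, i < j ∧ j < k ∧ k < s.length ∧
    s.getD i 0 * s.getD k 0 = (s.getD j 0) ^ 2 ∧ s.getD i 0 ≠ s.getD j 0

-- B's condition, as a Prop over values of a.
def BP (a : List Int) : Prop :=
  (2 ≤ a.count 0 ∧ ∃ x ∈ a, x < 0) ∨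
  (∃ x ∈ a, ∃ y ∈ a, x ≠ 0 ∧ x < y ∧ x ∣ y * y ∧ y < y * y / x ∧ y * y / x ∈ a)

-- In a sorted list, strictly smaller value means strictly smaller index.
lemma idx_lt_of_sorted {s : List Int} (hs : s.Pairwise (· ≤ ·))
    {i j : ℕ} (hi : i < s.length) (hj : j < s.length) (h : s[i] < s[j]) : i < j := by
  by_contra hle
  push Not at hle
  rcases Nat.lt_or_ge j i with hlt | hge
  · exact absurd (List.pairwise_iff_getElem.mp hs j i hj hi hlt) (by omega)
  · have : j = i := by omega
    subst this; omega

-- count v ≥ 2 gives two ordered positions holding v, and conversely.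
lemma two_le_count_iff {l : List Int} {v : Int} :
    2 ≤ l.count v ↔ ∃ i j : ℕ, ∃ hi : i < l.length, ∃ hj : j < l.length, i < j ∧ l[i] = v ∧ l[j] = v := by
  constructor
  · intro h
    have hdup : l.Duplicate v := List.duplicate_iff_two_le_count.mpr h
    have hsub : List.Sublist [v, v] l := List.duplicate_iff_sublist.mp hdup
    obtain ⟨is, his, hpw⟩ := List.sublist_eq_map_getElem hsub
    rcases is with - | ⟨i, is⟩
    · simp at his
    rcases is with - | ⟨j, is⟩
    · simp at his
    rcases is with - | ⟨m, is⟩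
    swap
    · simp at his
    simp only [List.map_cons, List.map_nil, List.cons.injEq, and_true] at his
    obtain ⟨h1, h2⟩ := his
    have hij : (i : ℕ) < (j : ℕ) := (List.pairwise_cons.mp hpw).1 j (by simp)
    exact ⟨i, j, i.isLt, j.isLt, hij, h1.symm, h2.symm⟩
  · rintro ⟨i, j, hi, hj, hij, hvi, hvj⟩
    have hsplit : l = l.take j ++ l.drop j := (List.take_append_drop j l).symm
    have hdropc : l.drop j = l[j] :: l.drop (j + 1) := (List.drop_eq_getElem_cons hj)
    have hmem : v ∈ l.take j := by
      have hlen : i < (l.take j).length := by simp [List.length_take]; omega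
      have : (l.take j)[i] = l[i] := List.getElem_take
      exact hvi ▸ this ▸ List.getElem_mem hlen
    have h1 : 1 ≤ (l.take j).count v := List.count_pos_iff.mpr hmem
    have h2 : 1 ≤ (l.drop j).count v := by
      rw [hdropc, List.count_cons]
      simp [hvj]
    calc 2 ≤ (l.take j).count v + (l.drop j).count v := by omega
    _ = l.count v := by rw [← List.count_append, List.take_append_drop]

lemma floordiv_of_dvd {a b : Int} (hb : b ≠ 0) (h : b ∣ a) :
    PySem.Int.floordiv a b = a / b := by
  have hm : PySem.Int.mod a b = 0 := (PySem.Int.mod_eq_zero_iff_dvd a b).mpr h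
  have := PySem.Int.floordiv_mul_add_mod a b
  rw [hm, add_zero] at this
  conv_rhs => rw [← this]
  exact (Int.mul_ediv_cancel _ hb).symm

-- the main combinatorial equivalence on the sorted list
lemma TriP_iff_BP (a : List Int) :
    TriP (PySem.List.sorted a (fun x => x) false) ↔ BP a := by
  set s := PySem.List.sorted a (fun x => x) false with hsdef
  have hs : s.Pairwise (· ≤ ·) := by
    have := PySem.List.sorted_pairwise a (fun x => x)
    simpa using this
  have hperm : s.Perm a := PySem.List.sorted_perm a (fun x => x) false
  constructor
  · rintro ⟨i, j, k, hij, hjk, hk, heq, hne⟩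
    have hi : i < s.length := by omega
    have hj : j < s.length := by omega
    rw [List.getD_eq_getElem s 0 hi, List.getD_eq_getElem s 0 hj, List.getD_eq_getElem s 0 hk] at heq
    rw [List.getD_eq_getElem s 0 hi, List.getD_eq_getElem s 0 hj] at hne
    have hxy : s[i] ≤ s[j] := List.pairwise_iff_getElem.mp hs i j hi hj hij
    have hyz : s[j] ≤ s[k] := List.pairwise_iff_getElem.mp hs j k hj hk hjk
    have hxlt : s[i] < s[j] := lt_of_le_of_ne hxy hne
    by_cases hyzeq : s[j] = s[k]
    · -- middle equals last: the middle value must be 0 and appears twice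
      have hy0 : s[j] = 0 := by
        rw [← hyzeq] at heq
        have : s[j] * (s[i] - s[j]) = 0 := by nlinarith [heq]
        rcases mul_eq_zero.mp this with h0 | h0
        · exact h0
        · exact absurd (by omega : s[i] = s[j]) hne
      left
      refine ⟨?_, s[i], hperm.mem_iff.mp (List.getElem_mem hi), by omega⟩
      rw [← hperm.count_eq]
      exact two_le_count_iff.mpr ⟨j, k, hj, hk, hjk, hy0, by omega⟩
    · -- three strictly increasing values
      have hylt : s[j] < s[k] := lt_of_le_of_ne hyz hyzeq
      have hx0 : s[i] ≠ 0 := by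
        intro h0
        rw [h0, zero_mul] at heq
        have : s[j] = 0 := pow_eq_zero_iff (by norm_num) |>.mp heq.symm
        omega
      have hyy : s[j] * s[j] = s[i] * s[k] := by rw [heq]; ring
      have hdvd : s[i] ∣ s[j] * s[j] := ⟨s[k], hyy⟩
      have hzval : s[j] * s[j] / s[i] = s[k] := by
        rw [hyy, Int.mul_ediv_cancel_left _ hx0]
      right
      refine ⟨s[i], hperm.mem_iff.mp (List.getElem_mem hi),
              s[j], hperm.mem_iff.mp (List.getElem_mem hj), hx0, hxlt, hdvd, ?_, ?_⟩
      · rw [hzval]; exact hylt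
      · rw [hzval]; exact hperm.mem_iff.mp (List.getElem_mem hk)
  · rintro (⟨hcnt, x, hxa, hxneg⟩ | ⟨x, hxa, y, hya, hx0, hxy, hdvd, hylt, hza⟩)
    · -- a negative value and two zeros
      rw [← hperm.count_eq] at hcnt
      obtain ⟨j, k, hj, hk, hjk, hj0, hk0⟩ := two_le_count_iff.mp hcnt
      obtain ⟨i, hi, hxi⟩ := List.mem_iff_getElem.mp (hperm.mem_iff.mpr hxa)
      have hij : i < j := idx_lt_of_sorted hs hi hj (by omega)
      refine ⟨i, j, k, hij, hjk, hk, ?_, ?_⟩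
      · rw [List.getD_eq_getElem s 0 hi, List.getD_eq_getElem s 0 hj, List.getD_eq_getElem s 0 hk,
            hj0, hk0]
        ring
      · rw [List.getD_eq_getElem s 0 hi, List.getD_eq_getElem s 0 hj]
        omega
    · -- three distinct values x < y < z with x*z = y²
      have hmul : x * (y * y / x) = y * y := Int.mul_ediv_cancel' hdvd
      obtain ⟨i, hi, hxi⟩ := List.mem_iff_getElem.mp (hperm.mem_iff.mpr hxa)
      obtain ⟨j, hj, hyj⟩ := List.mem_iff_getElem.mp (hperm.mem_iff.mpr hya)
      obtain ⟨k, hk, hzk⟩ := List.mem_iff_getElem.mp (hperm.mem_iff.mpr hza)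
      have hij : i < j := idx_lt_of_sorted hs hi hj (by omega)
      have hjk : j < k := idx_lt_of_sorted hs hj hk (by omega)
      refine ⟨i, j, k, hij, hjk, hk, ?_, ?_⟩
      · rw [List.getD_eq_getElem s 0 hi, List.getD_eq_getElem s 0 hj, List.getD_eq_getElem s 0 hk,
            hxi, hyj, hzk]
        rw [hmul]; ring
      · rw [List.getD_eq_getElem s 0 hi, List.getD_eq_getElem s 0 hj]
        omega

-- A's nested any equals TriP.
lemma check_any_iff (s : List Int) :
    ((PySem.List.pyRange 0 ((s.length : Int) - 2) 1).any (fun i =>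
      (PySem.List.pyRange (i + 1) ((s.length : Int) - 1) 1).any (fun j =>
        (PySem.List.pyRange (j + 1) (s.length : Int) 1).any (fun k =>
          decide (PySem.List.pyGetD s i 0 * PySem.List.pyGetD s k 0 = (PySem.List.pyGetD s j 0) ^ 2
                  ∧ PySem.List.pyGetD s i 0 ≠ PySem.List.pyGetD s j 0)))) = true) ↔ TriP s := by
  simp only [List.any_eq_true, PySem.List.mem_pyRange_one, decide_eq_true_eq]
  constructor
  · rintro ⟨i, ⟨hi0, hi2⟩, j, ⟨hj1, hj2⟩, k, ⟨hk1, hk2⟩, heq, hne⟩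
    have h0j : (0 : Int) ≤ j := by omega
    have h0k : (0 : Int) ≤ k := by omega
    rw [PySem.List.pyGetD_eq_getElem s 0 hi0 (by omega),
        PySem.List.pyGetD_eq_getElem s 0 h0j (by omega),
        PySem.List.pyGetD_eq_getElem s 0 h0k (by omega)] at heq
    rw [PySem.List.pyGetD_eq_getElem s 0 hi0 (by omega),
        PySem.List.pyGetD_eq_getElem s 0 h0j (by omega)] at hne
    refine ⟨i.toNat, j.toNat, k.toNat, by omega, by omega, by omega, ?_, ?_⟩
    · rw [List.getD_eq_getElem s 0 (by omega), List.getD_eq_getElem s 0 (by omega),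
          List.getD_eq_getElem s 0 (by omega)]
      exact heq
    · rw [List.getD_eq_getElem s 0 (by omega), List.getD_eq_getElem s 0 (by omega)]
      exact hne
  · rintro ⟨i, j, k, hij, hjk, hk, heq, hne⟩
    refine ⟨(i : Int), ⟨by omega, by omega⟩,
            (j : Int), ⟨by omega, by omega⟩,
            (k : Int), ⟨by omega, by omega⟩, ?_⟩
    rw [PySem.List.pyGetD_natCast, PySem.List.pyGetD_natCast, PySem.List.pyGetD_natCast]
    exact ⟨heq, hne⟩

-- B's booleans equal BP.
lemma check_alt_iff (a : List Int) :
    ((decide (2 ≤ PySem.List.count a 0) && (PySem.Set.ofList a).any (fun x => decide (x < 0))) = true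
      ∨ ((PySem.Set.ofList a).any (fun x => decide (x ≠ 0) &&
        (PySem.Set.ofList a).any (fun y => decide (x < y) && decide (PySem.Int.mod (y * y) x = 0) &&
          (decide (y < PySem.Int.floordiv (y * y) x) &&
            PySem.Set.contains (PySem.Set.ofList a) (PySem.Int.floordiv (y * y) x)))) = true))
    ↔ BP a := by
  simp only [List.any_eq_true, Bool.and_eq_true, decide_eq_true_eq, PySem.Set.mem_ofList,
             PySem.List.count_eq, PySem.Int.mod_eq_zero_iff_dvd, PySem.Set.contains, List.contains_iff_mem]
  constructor
  · rintro (⟨hc, x, hx, hneg⟩ | ⟨x, hx, hx0, y, hy, ⟨hxy, hdvd⟩, hlt, hmem⟩)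
    · exact Or.inl ⟨hc, x, hx, hneg⟩
    · rw [floordiv_of_dvd hx0 hdvd] at hlt hmem
      exact Or.inr ⟨x, hx, y, hy, hx0, hxy, hdvd, hlt, hmem⟩
  · rintro (⟨hc, x, hx, hneg⟩ | ⟨x, hx, y, hy, hx0, hxy, hdvd, hlt, hmem⟩)
    · exact Or.inl ⟨hc, x, hx, hneg⟩
    · refine Or.inr ⟨x, hx, hx0, y, hy, ⟨hxy, hdvd⟩, ?_, ?_⟩ <;>
        rw [floordiv_of_dvd hx0 hdvd]
      · exact hlt
      · exact hmem

-- ===== VERDICT (by name: the statement is the Claim_ definition above) =====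
theorem check_spec : Claim_equal_check := by
  intro a _
  show check a = check_alt a
  unfold check check_alt
  simp only
  have hA := check_any_iff (PySem.List.sorted a (fun x => x) false)
  have hB := check_alt_iff a
  rw [TriP_iff_BP] at hA
  by_cases h : BP a
  · rw [if_pos (hA.mpr h)]
    rcases hB.mpr h with h1 | h2
    · rw [if_pos h1]
    · by_cases hc1 : (decide (2 ≤ PySem.List.count a 0) && (PySem.Set.ofList a).any (fun x => decide (x < 0))) = true
      · rw [if_pos hc1]
      · rw [if_neg hc1, if_pos h2]
  · rw [if_neg (fun hc => h (hA.mp hc))]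
    have h1 : ¬ _ := fun hc => h (hB.mp (Or.inl hc))
    have h2 : ¬ _ := fun hc => h (hB.mp (Or.inr hc))
    rw [if_neg h1, if_neg h2]
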